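-- pv_equiv track=rewrite | github.com/FIREpresent/EGE | 30092024/№11.py | func
-- ===== SOURCE A (Python) =====
-- def func(x, lines):
--     count = 0
--     good = 0
--     if len(set(x)) == len(x):
--         for k in range(6):
--             for i in range(len(lines)):
--                 for j in range(6):
--                     if x[k] == lines[i][j]:
--                         count += 1
--             if count - 1 == 45:
--                 good += 1
--     return good
-- ===== SOURCE B (Python) =====
-- def func(x, lines):
--     if len(set(x)) != len(x):
--         return 0
--     table = {}
--     for row in lines:
--         for j in range(6):
--             v = row[j]
--             table[v] = table.get(v, 0) + 1
--     good = 0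
--     count = 0
--     for v in x[:6]:
--         count += table.get(v, 0)
--         if count == 46:
--             good += 1
--     return good
-- ===== Notes on version B (the rewrite author's own statement) =====
-- stated objective: alternative
-- what changed: Replaces the 6-fold repeated scan of all lines (one full rescan per x[k]) with a single pass that builds an occurrence table of the six columns, then six table lookups while keeping the cumulative count.
import Mathlib
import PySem

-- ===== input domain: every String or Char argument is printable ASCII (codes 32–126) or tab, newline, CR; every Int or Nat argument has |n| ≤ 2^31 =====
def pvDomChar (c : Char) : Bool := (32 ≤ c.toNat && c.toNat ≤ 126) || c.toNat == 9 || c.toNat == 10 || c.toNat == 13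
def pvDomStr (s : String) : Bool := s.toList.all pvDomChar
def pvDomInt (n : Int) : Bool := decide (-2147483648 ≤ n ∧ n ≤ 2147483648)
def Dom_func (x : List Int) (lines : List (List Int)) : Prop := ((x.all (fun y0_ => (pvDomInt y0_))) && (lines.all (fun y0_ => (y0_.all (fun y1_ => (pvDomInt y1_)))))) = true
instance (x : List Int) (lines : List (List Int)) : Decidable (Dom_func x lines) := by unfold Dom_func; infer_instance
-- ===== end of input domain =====

-- B replaces A's repeated 6×N×6 re-scans with one counting-table pass over the lines plus six lookups.


-- ===== PORT A =====
def func (x : List Int) (lines : List (List Int)) : Int :=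
  if (PySem.Set.ofList x).length = x.length then
    ((PySem.List.pyRange 0 6 1).foldl (fun (st : Int × Int) k =>
      let count := lines.foldl (fun c row =>
        (PySem.List.pyRange 0 6 1).foldl (fun c j =>
          if (PySem.List.pyGet? x k).getD 0 = (PySem.List.pyGet? row j).getD 0 then c + 1
          else c) c) st.1
      if count - 1 = 45 then (count, st.2 + 1) else (count, st.2)) ((0 : Int), (0 : Int))).2
  else 0

-- ===== PORT B =====
def func_alt (x : List Int) (lines : List (List Int)) : Int :=
  if (PySem.Set.ofList x).length = x.length then
    let table : PySem.Dict Int Int := lines.foldl (fun t row =>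
      (PySem.List.pyRange 0 6 1).foldl (fun t j =>
        let v := (PySem.List.pyGet? row j).getD 0
        t.insert v (t.getD v 0 + 1)) t)
      PySem.Dict.empty
    ((PySem.List.slice x none (some 6)).foldl (fun (st : Int × Int) v =>
      let c := st.1 + table.getD v 0
      (c, if c = 46 then st.2 + 1 else st.2)) ((0 : Int), (0 : Int))).2
  else 0

-- ===== PRECONDITION & SPEC =====
-- Pre_ excludes exactly the inputs where A raises IndexError: a duplicate-free x with
-- non-empty lines but fewer than 6 elements in x or in some line.
def Pre_func (x : List Int) (lines : List (List Int)) : Prop :=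
  x.Nodup → lines ≠ [] → (6 ≤ x.length ∧ ∀ row ∈ lines, 6 ≤ row.length)
instance (x : List Int) (lines : List (List Int)) : Decidable (Pre_func x lines) := by
  unfold Pre_func; infer_instance
def pvWitness_func : List Int × List (List Int) := ([1, 2, 3, 4, 5, 6], [[1, 1, 1, 1, 1, 1]])

def Spec_func (x : List Int) (lines : List (List Int)) (out : Int) : Prop := out = func_alt x lines
instance (x : List Int) (lines : List (List Int)) (out : Int) : Decidable (Spec_func x lines out) := by
  unfold Spec_func; infer_instance

-- ===== CLAIM (what is proved, stated in full; the proofs are below) =====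
def Claim_equal_func : Prop := ∀ (x : List Int) (lines : List (List Int)),
  Dom_func x lines → Pre_func x lines → Spec_func x lines (func x lines)
-- ===== LEMMAS AND PROOFS =====

-- total number of occurrences of v in the first six columns of the lines
def pvS (lines : List (List Int)) (v : Int) : Int :=
  (lines.map (fun row => ((PySem.List.slice row none (some 6)).count v : Int))).sum

-- len(set(x)) == len(x) is exactly distinctness.
lemma ofList_len_iff (x : List Int) : (PySem.Set.ofList x).length = x.length ↔ x.Nodup := by
  induction x using List.reverseRecOn with
  | nil => simp [PySem.Set.ofList]
  | append_singleton xs a ih =>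
    rw [PySem.Set.ofList_append_singleton, PySem.Set.add_eq_ite]
    by_cases h : a ∈ PySem.Set.ofList xs
    · rw [if_pos h]
      have hle := PySem.Set.length_ofList_le (xs := xs)
      have ha : a ∈ xs := (PySem.Set.mem_ofList xs a).1 h
      simp only [List.length_append, List.length_singleton]
      constructor
      · intro hlen; omega
      · intro hnd
        exfalso
        exact (List.nodup_append.1 hnd).2.2 a ha a (by simp) rfl
    · rw [if_neg h]
      have ha : a ∉ xs := fun hm => h ((PySem.Set.mem_ofList xs a).2 hm)
      simp only [List.length_append, List.length_singleton]
      rw [List.nodup_append]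
      constructor
      · intro hlen
        refine ⟨ih.1 (by omega), List.nodup_singleton a, ?_⟩
        intro b hb; simp; rintro rfl; exact ha hb
      · rintro ⟨hnd, -, -⟩
        have := ih.2 hnd; omega

lemma gx0 (a b c d e f : Int) (r : List Int) :
    (PySem.List.pyGet? (a::b::c::d::e::f::r) 0).getD 0 = a := by
  simp [PySem.List.pyGet?, PySem.List.pyIdx?]; rw [if_pos (by omega)]; simp

lemma gx1 (a b c d e f : Int) (r : List Int) :
    (PySem.List.pyGet? (a::b::c::d::e::f::r) 1).getD 0 = b := by
  simp [PySem.List.pyGet?, PySem.List.pyIdx?]; rw [if_pos (by omega)]; simp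

lemma gx2 (a b c d e f : Int) (r : List Int) :
    (PySem.List.pyGet? (a::b::c::d::e::f::r) 2).getD 0 = c := by
  simp [PySem.List.pyGet?, PySem.List.pyIdx?]; rw [if_pos (by omega)]; simp

lemma gx3 (a b c d e f : Int) (r : List Int) :
    (PySem.List.pyGet? (a::b::c::d::e::f::r) 3).getD 0 = d := by
  simp [PySem.List.pyGet?, PySem.List.pyIdx?]; rw [if_pos (by omega)]; simp

lemma gx4 (a b c d e f : Int) (r : List Int) :
    (PySem.List.pyGet? (a::b::c::d::e::f::r) 4).getD 0 = e := by
  simp [PySem.List.pyGet?, PySem.List.pyIdx?]; rw [if_pos (by omega)]; simp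

lemma gx5 (a b c d e f : Int) (r : List Int) :
    (PySem.List.pyGet? (a::b::c::d::e::f::r) 5).getD 0 = f := by
  simp [PySem.List.pyGet?, PySem.List.pyIdx?]; rw [if_pos (by omega)]; simp
-- one line's inner j-scan counts occurrences of v among its first six elements
lemma inner_row (v : Int) (row : List Int) (h : 6 ≤ row.length) (c : Int) :
    (PySem.List.pyRange 0 6 1).foldl (fun c j =>
        if v = (PySem.List.pyGet? row j).getD 0 then c + 1 else c) c
      = c + ((PySem.List.slice row none (some 6)).count v : Int) := by
  rcases row with _|⟨r0,_|⟨r1,_|⟨r2,_|⟨r3,_|⟨r4,_|⟨r5,rest⟩⟩⟩⟩⟩⟩ <;> simp at h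
  have hr : PySem.List.pyRange 0 6 1 = [0,1,2,3,4,5] := rfl
  have hs : PySem.List.slice (r0::r1::r2::r3::r4::r5::rest) none (some 6) = [r0,r1,r2,r3,r4,r5] := by
    simp [PySem.List.slice]
  rw [hr, hs]
  simp only [List.foldl, gx0, gx1, gx2, gx3, gx4, gx5, List.count_cons, List.count_nil,
    beq_iff_eq, @eq_comm _ v]
  split_ifs <;> push_cast <;> omega

-- A's scan over all lines adds the total number of occurrences of v in the first six columns
lemma lines_fold (lines : List (List Int)) (hrows : ∀ row ∈ lines, 6 ≤ row.length)
    (v c : Int) :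
    lines.foldl (fun c row =>
        (PySem.List.pyRange 0 6 1).foldl (fun c j =>
          if v = (PySem.List.pyGet? row j).getD 0 then c + 1 else c) c) c
      = c + pvS lines v := by
  induction lines generalizing c with
  | nil => simp [pvS]
  | cons row rest ih =>
    have hr : 6 ≤ row.length := hrows row (by simp)
    simp only [List.foldl, pvS, List.map, List.sum_cons]
    rw [inner_row v row hr c, ih (fun r hm => hrows r (by simp [hm]))]
    simp only [pvS]
    ring

-- one line's six indexed reads add its first-six occurrence counts to the table
lemma row_build (row : List Int) (h : 6 ≤ row.length) (t : PySem.Dict Int Int) (v : Int) :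
    ((PySem.List.pyRange 0 6 1).foldl (fun t j =>
        t.insert ((PySem.List.pyGet? row j).getD 0)
          (t.getD ((PySem.List.pyGet? row j).getD 0) 0 + 1)) t).getD v 0
      = t.getD v 0 + ((PySem.List.slice row none (some 6)).count v : Int) := by
  rcases row with _|⟨r0,_|⟨r1,_|⟨r2,_|⟨r3,_|⟨r4,_|⟨r5,rest⟩⟩⟩⟩⟩⟩ <;> simp at h
  rw [show PySem.List.pyRange 0 6 1 = ([0,1,2,3,4,5] : List Int) from rfl]
  rw [← List.foldl_map
    (f := fun j : Int => (PySem.List.pyGet? (r0::r1::r2::r3::r4::r5::rest) j).getD 0)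
    (g := fun (t : PySem.Dict Int Int) u => t.insert u (t.getD u 0 + 1))]
  rw [show ([0,1,2,3,4,5] : List Int).map
      (fun j => (PySem.List.pyGet? (r0::r1::r2::r3::r4::r5::rest) j).getD 0)
      = [r0,r1,r2,r3,r4,r5] from by
    simp only [List.map_cons, List.map_nil, gx0, gx1, gx2, gx3, gx4, gx5]]
  rw [PySem.Dict.getD_foldl_insert_add_one]
  rw [show PySem.List.slice (r0::r1::r2::r3::r4::r5::rest) none (some 6) = [r0,r1,r2,r3,r4,r5] from by
    simp [PySem.List.slice]]

-- B's table lookup yields the same total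
lemma table_getD (lines : List (List Int)) (hrows : ∀ row ∈ lines, 6 ≤ row.length)
    (t : PySem.Dict Int Int) (v : Int) :
    (lines.foldl (fun t row =>
        (PySem.List.pyRange 0 6 1).foldl (fun t j =>
          t.insert ((PySem.List.pyGet? row j).getD 0)
            (t.getD ((PySem.List.pyGet? row j).getD 0) 0 + 1)) t) t).getD v 0
      = t.getD v 0 + pvS lines v := by
  induction lines generalizing t with
  | nil => simp [pvS]
  | cons row rest ih =>
    have hr : 6 ≤ row.length := hrows row (by simp)
    simp only [List.foldl, pvS, List.map, List.sum_cons]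
    rw [ih (fun r hm => hrows r (by simp [hm])), row_build row hr]
    simp only [pvS]
    ring

-- B's scan when the table is empty: the state never moves
lemma empty_fold (ys : List Int) (g : Int) :
    ys.foldl (fun (st : Int × Int) v =>
        (st.1 + (PySem.Dict.empty : PySem.Dict Int Int).getD v 0,
         if st.1 + (PySem.Dict.empty : PySem.Dict Int Int).getD v 0 = 46 then st.2 + 1 else st.2))
      ((0 : Int), g) = (0, g) := by
  induction ys generalizing g with
  | nil => rfl
  | cons y ys ih => simpa [PySem.Dict.getD_empty] using ih g

-- ===== VERDICT (by name: the statement is the Claim_ definition above) =====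
set_option maxHeartbeats 1000000 in
theorem func_spec : Claim_equal_func := by
  intro x lines _ hpre
  unfold Spec_func func func_alt
  by_cases hset : (PySem.Set.ofList x).length = x.length
  · rw [if_pos hset, if_pos hset]
    have hnd : x.Nodup := (ofList_len_iff x).1 hset
    by_cases hl : lines = []
    · subst hl
      refine Eq.trans (b := (0 : Int)) ?_ ?_
      · rfl
      · exact (congrArg Prod.snd (empty_fold (PySem.List.slice x none (some 6)) 0)).symm
    · obtain ⟨hxlen, hrows⟩ := hpre hnd hl
      rcases x with _|⟨x0,_|⟨x1,_|⟨x2,_|⟨x3,_|⟨x4,_|⟨x5,xr⟩⟩⟩⟩⟩⟩ <;> simp at hxlen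
      have hslice : PySem.List.slice (x0::x1::x2::x3::x4::x5::xr) none (some 6) = [x0,x1,x2,x3,x4,x5] := by
        simp [PySem.List.slice]
      refine Eq.trans (b := (List.foldl (fun (st : Int × Int) v =>
          (st.1 + pvS lines v, if st.1 + pvS lines v = 46 then st.2 + 1 else st.2))
          ((0:Int),(0:Int)) [x0,x1,x2,x3,x4,x5]).2) ?_ ?_
      · -- A side
        have hAfun : (fun (st : Int × Int) k =>
            let count := lines.foldl (fun c row =>
              (PySem.List.pyRange 0 6 1).foldl (fun c j =>
                if (PySem.List.pyGet? (x0::x1::x2::x3::x4::x5::xr) k).getD 0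
                    = (PySem.List.pyGet? row j).getD 0 then c + 1 else c) c) st.1
            if count - 1 = 45 then (count, st.2 + 1) else (count, st.2))
            = (fun (st : Int × Int) k =>
              (st.1 + pvS lines ((PySem.List.pyGet? (x0::x1::x2::x3::x4::x5::xr) k).getD 0),
               if st.1 + pvS lines ((PySem.List.pyGet? (x0::x1::x2::x3::x4::x5::xr) k).getD 0) = 46
               then st.2 + 1 else st.2)) := by
          funext st k
          simp only [lines_fold lines hrows]
          split_ifs <;> first | rfl | (exfalso; omega)
        rw [hAfun, show PySem.List.pyRange 0 6 1 = ([0,1,2,3,4,5] : List Int) from rfl]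
        rw [← List.foldl_map
          (f := fun k : Int => (PySem.List.pyGet? (x0::x1::x2::x3::x4::x5::xr) k).getD 0)
          (g := fun (st : Int × Int) v =>
            (st.1 + pvS lines v, if st.1 + pvS lines v = 46 then st.2 + 1 else st.2))]
        rw [show ([0,1,2,3,4,5] : List Int).map
            (fun k => (PySem.List.pyGet? (x0::x1::x2::x3::x4::x5::xr) k).getD 0)
            = [x0,x1,x2,x3,x4,x5] from by
          simp only [List.map_cons, List.map_nil, gx0, gx1, gx2, gx3, gx4, gx5]]
      · -- B side
        rw [hslice]
        have hBfun : (fun (st : Int × Int) v =>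
            (st.1 + (List.foldl (fun t row =>
              (PySem.List.pyRange 0 6 1).foldl (fun t j =>
                t.insert ((PySem.List.pyGet? row j).getD 0)
                  (t.getD ((PySem.List.pyGet? row j).getD 0) 0 + 1)) t)
              PySem.Dict.empty lines).getD v 0,
             if st.1 + (List.foldl (fun t row =>
              (PySem.List.pyRange 0 6 1).foldl (fun t j =>
                t.insert ((PySem.List.pyGet? row j).getD 0)
                  (t.getD ((PySem.List.pyGet? row j).getD 0) 0 + 1)) t)
              PySem.Dict.empty lines).getD v 0 = 46 then st.2 + 1 else st.2))
            = (fun (st : Int × Int) v =>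
              (st.1 + pvS lines v, if st.1 + pvS lines v = 46 then st.2 + 1 else st.2)) := by
          funext st v
          simp only [table_getD lines hrows PySem.Dict.empty v, PySem.Dict.getD_empty, zero_add]
        exact (congrArg (fun f => (List.foldl f ((0:Int),(0:Int)) [x0,x1,x2,x3,x4,x5]).2) hBfun).symm
  · rw [if_neg hset, if_neg hset]
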